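-- pv_equiv track=rewrite | github.com/harrisonized/interview-practice | functions/iterators.py | idx_for_diag_nw_from_tr
-- ===== SOURCE A (Python) =====
-- def idx_for_diag_nw_from_tr(num_rows=2, num_cols=3):
--     """Traverse northwest diagonals from top right
--     Eg.
--
--      0   -1   -2
--       \\   \\   \\
--     1 ['A', 'B', 'C']
--       \\   \\   \\
--       ['D', 'E', 'F']
--
--     Returns row and col indices for: C, F, B, E, A, D
--     """
--     # upper right triangle
--     for row in range(num_rows-1):
--         col = num_cols-1
--         while row >= 0 and col >= 0:
--             yield row, col
--             row -= 1
--             col -= 1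
--
--     # lower left triangle
--     for col in range(num_cols-1, -1, -1):
--         row = num_rows-1
--         while row >= 0 and col >= 0:
--             yield row, col
--             row -= 1
--             col -= 1
-- ===== SOURCE B (Python) =====
-- def idx_for_diag_nw_from_tr(num_rows=2, num_cols=3):
--     """Single loop over the diagonal index d = row - col, from the
--     top-right diagonal to the bottom-left, walking each diagonal northwest."""
--     for d in range(-(num_cols - 1), num_rows):
--         row = min(num_rows - 1, num_cols - 1 + d)
--         while row >= 0 and 0 <= row - d < num_cols:
--             yield row, row - d
--             row -= 1
-- ===== Notes on version B (the rewrite author's own statement) =====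
-- stated objective: alternative
-- what changed: Replaced A's two separate triangle loops (upper-right rows, then lower-left columns) by a single loop over the diagonal index d = row - col, computing each diagonal's start row with min and walking northwest while deriving col as row - d.
import Mathlib
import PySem

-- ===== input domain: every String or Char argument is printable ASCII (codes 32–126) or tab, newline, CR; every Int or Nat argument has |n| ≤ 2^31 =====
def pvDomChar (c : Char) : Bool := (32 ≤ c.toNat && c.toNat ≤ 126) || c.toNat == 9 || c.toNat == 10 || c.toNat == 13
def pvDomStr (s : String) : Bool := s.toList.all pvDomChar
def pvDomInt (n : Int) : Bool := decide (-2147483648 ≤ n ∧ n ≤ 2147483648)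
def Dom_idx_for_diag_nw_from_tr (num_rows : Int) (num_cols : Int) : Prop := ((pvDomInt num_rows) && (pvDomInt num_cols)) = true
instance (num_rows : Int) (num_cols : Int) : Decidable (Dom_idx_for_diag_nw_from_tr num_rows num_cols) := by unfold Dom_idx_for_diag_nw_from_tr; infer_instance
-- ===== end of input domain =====

-- B replaces A's two triangle loops by one loop over the diagonal index d = row - col (alternative decomposition).


-- ===== PORT A =====
-- the inner 'while row >= 0 and col >= 0: yield row, col; row -= 1; col -= 1'
def pvWalkA (row col : Int) : List (Int × Int) :=
  if h : 0 ≤ row ∧ 0 ≤ col then (row, col) :: pvWalkA (row - 1) (col - 1) else []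
termination_by (row + 1).toNat
decreasing_by omega

def idx_for_diag_nw_from_tr (num_rows : Int) (num_cols : Int) : List (Int × Int) :=
  -- upper right triangle: for row in range(num_rows-1)
  ((PySem.List.pyRange 0 (num_rows - 1) 1).flatMap (fun row => pvWalkA row (num_cols - 1)))
  ++
  -- lower left triangle: for col in range(num_cols-1, -1, -1)
  ((PySem.List.pyRange (num_cols - 1) (-1) (-1)).flatMap (fun col => pvWalkA (num_rows - 1) col))

-- ===== PORT B =====
-- the inner 'while row >= 0 and 0 <= row - d < num_cols: yield row, row - d; row -= 1'
def pvWalkB (num_cols d row : Int) : List (Int × Int) :=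
  if h : 0 ≤ row ∧ 0 ≤ row - d ∧ row - d < num_cols then (row, row - d) :: pvWalkB num_cols d (row - 1) else []
termination_by (row + 1).toNat
decreasing_by omega

def idx_for_diag_nw_from_tr_alt (num_rows : Int) (num_cols : Int) : List (Int × Int) :=
  -- for d in range(-(num_cols-1), num_rows): row = min(num_rows-1, num_cols-1+d); while …
  (PySem.List.pyRange (-(num_cols - 1)) num_rows 1).flatMap
    (fun d => pvWalkB num_cols d (min (num_rows - 1) (num_cols - 1 + d)))

-- ===== PRECONDITION & SPEC =====
def Spec_idx_for_diag_nw_from_tr (num_rows : Int) (num_cols : Int) (out : List (Int × Int)) : Prop := out = idx_for_diag_nw_from_tr_alt num_rows num_cols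
instance (num_rows : Int) (num_cols : Int) (out : List (Int × Int)) : Decidable (Spec_idx_for_diag_nw_from_tr num_rows num_cols out) := by unfold Spec_idx_for_diag_nw_from_tr; infer_instance

-- ===== CLAIM (what is proved, stated in full; the proofs are below) =====
def Claim_equal_idx_for_diag_nw_from_tr : Prop := ∀ (num_rows : Int) (num_cols : Int), Dom_idx_for_diag_nw_from_tr num_rows num_cols → Spec_idx_for_diag_nw_from_tr num_rows num_cols (idx_for_diag_nw_from_tr num_rows num_cols)

-- ===== LEMMAS AND PROOFS =====

theorem pvWalkA_nil (row col : Int) (h : ¬ (0 ≤ row ∧ 0 ≤ col)) : pvWalkA row col = [] := by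
  rw [pvWalkA, dif_neg h]

theorem pvWalkB_nil (num_cols d row : Int) (h : ¬ (0 ≤ row ∧ 0 ≤ row - d ∧ row - d < num_cols)) :
    pvWalkB num_cols d row = [] := by
  rw [pvWalkB, dif_neg h]

-- any A-diagonal walk equals the B-walk on diagonal d = row - col, as long as col is inside the grid
theorem pvWalk_eq (num_cols : Int) (row col : Int) (h : col < num_cols) :
    pvWalkA row col = pvWalkB num_cols (row - col) row := by
  by_cases hc : 0 ≤ row ∧ 0 ≤ col
  · rw [pvWalkA, pvWalkB]
    have h1 : 0 ≤ row ∧ 0 ≤ row - (row - col) ∧ row - (row - col) < num_cols := by omega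
    simp only [dif_pos hc, dif_pos h1]
    have hcol : row - (row - col) = col := by omega
    rw [hcol]
    have := pvWalk_eq num_cols (row - 1) (col - 1) (by omega)
    have harg : row - 1 - (col - 1) = row - col := by omega
    rw [harg] at this
    rw [this]
  · rw [pvWalkA_nil _ _ hc, pvWalkB_nil]
    omega
termination_by (row + 1).toNat
decreasing_by omega

theorem alt_eq (num_rows num_cols : Int) :
    idx_for_diag_nw_from_tr num_rows num_cols = idx_for_diag_nw_from_tr_alt num_rows num_cols := by
  unfold idx_for_diag_nw_from_tr idx_for_diag_nw_from_tr_alt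
  by_cases hr : 1 ≤ num_rows
  · by_cases hc : 1 ≤ num_cols
    · -- main case: split B's d-range at num_rows - num_cols
      rw [PySem.List.pyRange_one_append (-(num_cols - 1)) (num_rows - num_cols) num_rows
            (by omega) (by omega)]
      rw [List.flatMap_append]
      congr 1
      · -- upper triangle ↔ d ∈ [-(num_cols-1), num_rows-num_cols)
        rw [PySem.List.pyRange_one, PySem.List.pyRange_one, List.flatMap_map, List.flatMap_map]
        have hlen : (num_rows - num_cols - -(num_cols - 1)).toNat = (num_rows - 1 - 0).toNat := by
          omega
        rw [hlen]
        apply List.flatMap_congr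
        intro k hk
        have hk' : (k : Int) < num_rows - 1 := by
          have := List.mem_range.mp hk; omega
        rw [pvWalk_eq num_cols (0 + (k : Int)) (num_cols - 1) (by omega)]
        have e1 : (0 + (k : Int)) - (num_cols - 1) = -(num_cols - 1) + (k : Int) := by omega
        have e2 : min (num_rows - 1) (num_cols - 1 + (-(num_cols - 1) + (k : Int))) = 0 + (k : Int) := by
          omega
        rw [e1, e2]
      · -- lower triangle ↔ d ∈ [num_rows-num_cols, num_rows)
        rw [PySem.List.pyRange_neg_one, PySem.List.pyRange_one, List.flatMap_map, List.flatMap_map]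
        have hlen : (num_rows - (num_rows - num_cols)).toNat = (num_cols - 1 - -1).toNat := by omega
        rw [hlen]
        apply List.flatMap_congr
        intro k hk
        have hk' : (k : Int) < num_cols := by
          have := List.mem_range.mp hk; omega
        rw [pvWalk_eq num_cols (num_rows - 1) (num_cols - 1 - (k : Int)) (by omega)]
        have e1 : num_rows - 1 - (num_cols - 1 - (k : Int)) = num_rows - num_cols + (k : Int) := by
          omega
        have e2 : min (num_rows - 1) (num_cols - 1 + (num_rows - num_cols + (k : Int))) = num_rows - 1 := by
          omega
        rw [e1, e2]
    · -- num_cols ≤ 0 : both sides are empty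
      apply Eq.trans (b := ([] : List (Int × Int)))
      · rw [PySem.List.pyRange_neg_one_eq_nil (by omega : num_cols - 1 ≤ -1)]
        simp only [List.flatMap_nil, List.append_nil]
        exact List.flatMap_eq_nil_iff.mpr (fun row _ => pvWalkA_nil _ _ (by omega))
      · exact (List.flatMap_eq_nil_iff.mpr (fun d _ => pvWalkB_nil _ _ _ (by omega))).symm
  · -- num_rows ≤ 0 : both sides are empty
    apply Eq.trans (b := ([] : List (Int × Int)))
    · rw [PySem.List.pyRange_one_eq_nil (by omega : num_rows - 1 ≤ 0)]
      simp only [List.flatMap_nil, List.nil_append]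
      exact List.flatMap_eq_nil_iff.mpr (fun col _ => pvWalkA_nil _ _ (by omega))
    · exact (List.flatMap_eq_nil_iff.mpr (fun d _ => pvWalkB_nil _ _ _ (by omega))).symm

-- ===== VERDICT (by name: the statement is the Claim_ definition above) =====
theorem idx_for_diag_nw_from_tr_spec : Claim_equal_idx_for_diag_nw_from_tr := by
  intro num_rows num_cols _
  exact alt_eq num_rows num_cols
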